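-- pv_equiv track=rewrite | github.com/EHwooKim/Algorithms | 프로그래머스/level2/42585.py | solution
-- ===== SOURCE A (Python) =====
-- def solution(arrangement):
--     answer = 0
--     count = 0
--     pre_open = False
--     for bracket in arrangement:
--         if bracket == '(':
--             count += 1
--             pre_open = True
--         else:
--             if pre_open == True:
--                 count -= 1
--                 answer += count
--             else:
--                 count -= 1
--                 answer += 1
--             pre_open = False
--
--     return answer
-- ===== SOURCE B (Python) =====
-- def solution(arrangement):
--     # Phase 1: precompute the running-depth profile (depths[k] = depth after k chars).
--     depths = [0]
--     for c in arrangement: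
--         depths.append(depths[-1] + (1 if c == '(' else -1))
--     # Phase 2: each non-'(' char ends something: a laser (previous char '(') cuts
--     # depths[i+1] open rods; otherwise it is a rod end worth 1.
--     return sum(depths[i + 1] if i > 0 and arrangement[i - 1] == '(' else 1
--                for i, c in enumerate(arrangement) if c != '(')
-- ===== Notes on version B (the rewrite author's own statement) =====
-- stated objective: alternative
-- what changed: Replaces A's single-pass answer/count/pre_open state machine with a two-phase computation: first precompute the running depth profile, then sum one contribution per closing character (the profile value after it when the preceding character opens a laser pair, else 1 for a rod end).
import Mathlib
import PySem

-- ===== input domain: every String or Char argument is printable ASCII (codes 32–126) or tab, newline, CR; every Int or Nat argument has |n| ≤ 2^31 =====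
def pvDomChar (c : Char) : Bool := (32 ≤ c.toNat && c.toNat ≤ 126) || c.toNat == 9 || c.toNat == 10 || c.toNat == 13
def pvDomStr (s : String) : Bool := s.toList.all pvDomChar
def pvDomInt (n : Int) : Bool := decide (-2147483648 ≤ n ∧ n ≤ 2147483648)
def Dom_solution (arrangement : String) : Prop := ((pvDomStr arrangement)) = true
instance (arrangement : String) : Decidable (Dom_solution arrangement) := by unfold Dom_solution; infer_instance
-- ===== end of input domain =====

-- B replaces A's answer/count/pre_open state machine by a precomputed depth profile
-- plus an indexed sum with lookback laser detection (objective: alternative decomposition).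


-- ===== PORT A =====
def solution (arrangement : String) : Int :=
  (arrangement.toList.foldl
    (fun (st : Int × Int × Bool) bracket =>
      if bracket = '(' then (st.1, st.2.1 + 1, true)
      else if st.2.2 = true then (st.1 + (st.2.1 - 1), st.2.1 - 1, false)
      else (st.1 + 1, st.2.1 - 1, false))
    (0, 0, false)).1

-- ===== PORT B =====
def solution_alt (arrangement : String) : Int :=
  let l := arrangement.toList
  let depths := l.foldl
    (fun (ds : List Int) c => ds ++ [PySem.List.pyGetD ds (-1) 0 + (if c = '(' then 1 else -1)])
    [(0 : Int)]
  (PySem.List.enumerate l).foldl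
    (fun (s : Int) (ic : Int × Char) =>
      if ic.2 ≠ '(' then
        s + (if ic.1 > 0 ∧ PySem.List.pyGetD l (ic.1 - 1) ' ' = '(' then
               PySem.List.pyGetD depths (ic.1 + 1) 0
             else 1)
      else s) 0

-- ===== PRECONDITION & SPEC =====
def Spec_solution (arrangement : String) (out : Int) : Prop := out = solution_alt arrangement
instance (arrangement : String) (out : Int) : Decidable (Spec_solution arrangement out) := by unfold Spec_solution; infer_instance

-- ===== CLAIM (what is proved, stated in full; the proofs are below) =====
def Claim_equal_solution : Prop := ∀ (arrangement : String), Dom_solution arrangement → Spec_solution arrangement (solution arrangement)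

-- ===== LEMMAS AND PROOFS =====

/-- per-char depth increment -/
def pvDelta (c : Char) : Int := if c = '(' then 1 else -1

/-- canonical recursive spec both ports are reduced to -/
def pvF : List Char → Int → Bool → Int
  | [], _, _ => 0
  | c :: t, d, p =>
      if c = '(' then pvF t (d + 1) true
      else (if p then d - 1 else 1) + pvF t (d - 1) false

/-- the tail of B's depth profile -/
def pvDepthsFrom : Int → List Char → List Int
  | _, [] => []
  | d, c :: t => (d + pvDelta c) :: pvDepthsFrom (d + pvDelta c) t

/-- depth after the first j characters -/
def pvDep (L : List Char) (j : Nat) : Int := ((L.take j).map pvDelta).sum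

theorem pvA_fold (l : List Char) : ∀ (ans count : Int) (pre : Bool),
    (l.foldl
      (fun (st : Int × Int × Bool) bracket =>
        if bracket = '(' then (st.1, st.2.1 + 1, true)
        else if st.2.2 = true then (st.1 + (st.2.1 - 1), st.2.1 - 1, false)
        else (st.1 + 1, st.2.1 - 1, false))
      (ans, count, pre)).1 = ans + pvF l count pre := by
  induction l with
  | nil => intro ans count pre; simp [pvF]
  | cons c t ih =>
      intro ans count pre
      by_cases hc : c = '('
      · simp [hc, pvF, ih]
      · cases pre <;> simp [hc, pvF, ih] <;> ring

theorem pvBuild_fold (l : List Char) : ∀ (acc : List Int) (x : Int),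
    l.foldl (fun (ds : List Int) c => ds ++ [PySem.List.pyGetD ds (-1) 0 + (if c = '(' then 1 else -1)])
      (acc ++ [x])
    = (acc ++ [x]) ++ pvDepthsFrom x l := by
  induction l with
  | nil => intro acc x; simp [pvDepthsFrom]
  | cons c t ih =>
      intro acc x
      have h1 : PySem.List.pyGetD (acc ++ [x]) (-1) (0 : Int) = x :=
        PySem.List.pyGetD_neg_one_append_singleton acc x 0
      have hd : x + (if c = '(' then (1 : Int) else -1) = x + pvDelta c := by simp [pvDelta]
      have := ih (acc ++ [x]) (x + pvDelta c)
      simp only [List.foldl_cons, h1, hd]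
      rw [show (acc ++ [x]) ++ [x + pvDelta c] = (acc ++ [x]) ++ [x + pvDelta c] from rfl, this]
      simp [pvDepthsFrom]

theorem pvDepthsFrom_getD (l : List Char) : ∀ (d : Int) (j : Nat), j < l.length →
    (pvDepthsFrom d l).getD j 0 = d + pvDep l (j + 1) := by
  induction l with
  | nil => intro d j h; simp at h
  | cons c t ih =>
      intro d j h
      cases j with
      | zero => simp [pvDepthsFrom, pvDep]
      | succ k =>
          have hk : k < t.length := by simpa using h
          have := ih (d + pvDelta c) k hk
          simp only [pvDepthsFrom, List.getD_cons_succ, this, pvDep, List.take_succ_cons,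
            List.map_cons, List.sum_cons]
          ring

theorem pvGet_of_drop (L : List Char) (j : Nat) (c : Char) (t : List Char)
    (h : L.drop j = c :: t) : L.getD j ' ' = c ∧ L.drop (j + 1) = t ∧ j < L.length := by
  have hj : j < L.length := by
    by_contra hge
    simp [List.drop_eq_nil_of_le (Nat.le_of_not_lt hge)] at h
  have hget : L[j] = c := by
    have h0 : (L.drop j)[0]'(by simp [h]) = c := by simp [h]
    simpa using h0
  refine ⟨by simp [List.getD_eq_getElem?_getD, List.getElem?_eq_getElem hj, hget], ?_, hj⟩
  have h1 : (L.drop j).drop 1 = t := by simp [h]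
  rw [← h1, List.drop_drop]

theorem pvDep_succ (L : List Char) (j : Nat) (c : Char) (t : List Char)
    (h : L.drop j = c :: t) : pvDep L (j + 1) = pvDep L j + pvDelta c := by
  obtain ⟨hgc, -, hj⟩ := pvGet_of_drop L j c t h
  have hget : L[j] = c := by
    simp [List.getD_eq_getElem?_getD, List.getElem?_eq_getElem hj] at hgc
    exact hgc
  have ht : L.take (j + 1) = L.take j ++ [c] := by
    rw [List.take_succ]
    simp [List.getElem?_eq_getElem hj, hget]
  simp [pvDep, ht]

theorem pvB_fold (L : List Char) (depths : List Int)
    (hdep : ∀ j : Nat, j ≤ L.length → depths.getD j 0 = pvDep L j) :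
    ∀ (t : List Char) (j : Nat) (ans : Int), L.drop j = t →
    ((PySem.List.enumerate t (j : Int)).foldl
      (fun (s : Int) (ic : Int × Char) =>
        if ic.2 ≠ '(' then
          s + (if ic.1 > 0 ∧ PySem.List.pyGetD L (ic.1 - 1) ' ' = '(' then
                 PySem.List.pyGetD depths (ic.1 + 1) 0
               else 1)
        else s) ans)
    = ans + pvF t (pvDep L j) (decide (0 < j ∧ L.getD (j - 1) ' ' = '(')) := by
  intro t
  induction t with
  | nil => intro j ans _; simp [PySem.List.enumerate_nil, pvF]
  | cons c t' ih =>
      intro j ans hdrop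
      obtain ⟨hgc, hdrop', hj⟩ := pvGet_of_drop L j c t' hdrop
      have hcast : ((j : Int) + 1) = ((j + 1 : Nat) : Int) := by push_cast; ring
      have hpre' : decide (0 < j + 1 ∧ L.getD (j + 1 - 1) ' ' = '(') = decide (c = '(') := by
        rw [Nat.add_sub_cancel, hgc]; simp
      have hdsucc := pvDep_succ L j c t' hdrop
      rw [PySem.List.enumerate_cons, List.foldl_cons]
      dsimp only
      by_cases hc : c = '('
      · have hstep : (if c ≠ '(' then
              ans + (if (j : Int) > 0 ∧ PySem.List.pyGetD L ((j : Int) - 1) ' ' = '(' then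
                       PySem.List.pyGetD depths ((j : Int) + 1) 0
                     else 1)
            else ans) = ans := by rw [if_neg]; simp [hc]
        rw [hstep, hcast, ih (j + 1) ans hdrop', hpre']
        have hrhs : pvF (c :: t') (pvDep L j) (decide (0 < j ∧ L.getD (j - 1) ' ' = '(')) =
            pvF t' (pvDep L j + 1) true := by simp [pvF, hc]
        rw [hrhs, hdsucc]
        simp [pvDelta, hc]
      · have hd' : pvDep L (j + 1) = pvDep L j - 1 := by
          rw [hdsucc]; simp [pvDelta, hc]; ring
        have hcond : ((j : Int) > 0 ∧ PySem.List.pyGetD L ((j : Int) - 1) ' ' = '(')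
            ↔ (0 < j ∧ L.getD (j - 1) ' ' = '(') := by
          cases j with
          | zero => simp
          | succ k =>
              have hk : ((k + 1 : Nat) : Int) - 1 = ((k : Nat) : Int) := by push_cast; ring
              rw [hk, PySem.List.pyGetD_natCast]
              simp [List.getD_eq_getElem?_getD]
        have hd1 : PySem.List.pyGetD depths ((j : Int) + 1) (0 : Int) = pvDep L j - 1 := by
          rw [hcast, PySem.List.pyGetD_natCast, List.getD_eq_getElem?_getD,
            ← List.getD_eq_getElem?_getD, hdep (j + 1) (by omega), hd']
        have hstep : (if c ≠ '(' then
              ans + (if (j : Int) > 0 ∧ PySem.List.pyGetD L ((j : Int) - 1) ' ' = '(' then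
                       PySem.List.pyGetD depths ((j : Int) + 1) 0
                     else 1)
            else ans)
            = ans + (if (0 < j ∧ L.getD (j - 1) ' ' = '(') then pvDep L j - 1 else 1) := by
          rw [if_pos hc, hd1]
          by_cases hp : (0 < j ∧ L.getD (j - 1) ' ' = '(')
          · rw [if_pos (hcond.mpr hp), if_pos hp]
          · rw [if_neg (fun hh => hp (hcond.mp hh)), if_neg hp]
        have hrhs : pvF (c :: t') (pvDep L j) (decide (0 < j ∧ L.getD (j - 1) ' ' = '(')) =
            (if (0 < j ∧ L.getD (j - 1) ' ' = '(') then pvDep L j - 1 else 1)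
              + pvF t' (pvDep L j - 1) false := by
          rw [pvF, if_neg hc]
          by_cases hp : (0 < j ∧ L.getD (j - 1) ' ' = '(') <;> simp [hp]
        rw [hstep, hcast, ih (j + 1) _ hdrop', hpre', hrhs, hd']
        have hfalse : decide (c = '(') = false := by simp [hc]
        rw [hfalse]
        ring

theorem pvAlt_eq (arrangement : String) :
    solution_alt arrangement = pvF arrangement.toList 0 false := by
  have h0 : solution_alt arrangement =
      (PySem.List.enumerate arrangement.toList).foldl
        (fun (s : Int) (ic : Int × Char) =>
          if ic.2 ≠ '(' then
            s + (if ic.1 > 0 ∧ PySem.List.pyGetD arrangement.toList (ic.1 - 1) ' ' = '(' then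
                   PySem.List.pyGetD
                     (arrangement.toList.foldl
                       (fun (ds : List Int) c =>
                         ds ++ [PySem.List.pyGetD ds (-1) 0 + (if c = '(' then 1 else -1)])
                       [(0 : Int)]) (ic.1 + 1) 0
                 else 1)
          else s) 0 := rfl
  have hbuild := pvBuild_fold arrangement.toList [] 0
  simp only [List.nil_append] at hbuild
  rw [h0, hbuild]
  have hdep : ∀ j : Nat, j ≤ arrangement.toList.length →
      (([(0 : Int)] ++ pvDepthsFrom 0 arrangement.toList).getD j 0) = pvDep arrangement.toList j := by
    intro j hle
    cases j with
    | zero => simp [pvDep]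
    | succ k =>
        have hk : k < arrangement.toList.length := by omega
        have := pvDepthsFrom_getD arrangement.toList 0 k hk
        simpa [pvDep] using this
  have hmain := pvB_fold arrangement.toList ([(0 : Int)] ++ pvDepthsFrom 0 arrangement.toList) hdep
    arrangement.toList 0 0 (by simp)
  simpa [pvDep] using hmain

-- ===== VERDICT (by name: the statement is the Claim_ definition above) =====
theorem solution_spec : Claim_equal_solution := by
  intro arrangement _
  unfold Spec_solution
  rw [pvAlt_eq]
  unfold solution
  rw [pvA_fold]
  simp
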